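-- pv_equiv track=rewrite | github.com/bulik0071/advent-of-code-2023 | day7/day7.py | determine_which_set_is_stronger_on_the_same_rank_p2
-- ===== SOURCE A (Python) =====
-- CARD_DISTINCT_2=['A', 'K', 'Q', 'T', '9', '8', '7', '6', '5', '4', '3', '2', 'J']
--
-- def determine_which_set_is_stronger_on_the_same_rank_p2(first_set:str,second_set:str):
--     for letter_index,letter in enumerate(first_set):
--         if CARD_DISTINCT_2.index(letter)<CARD_DISTINCT_2.index(second_set[letter_index]):
--             return False
--         elif CARD_DISTINCT_2.index(letter)==CARD_DISTINCT_2.index(second_set[letter_index]):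
--             continue
--         else:
--             return True
-- ===== SOURCE B (Python) =====
-- CARD_DISTINCT_2 = ['A', 'K', 'Q', 'T', '9', '8', '7', '6', '5', '4', '3', '2', 'J']
-- # order-preserving translation: stronger card -> smaller code point (14..26)
-- _TO_STRENGTH = str.maketrans({c: chr(14 + i) for i, c in enumerate(CARD_DISTINCT_2)})
--
--
-- def determine_which_set_is_stronger_on_the_same_rank_p2(first_set: str, second_set: str):
--     # translate both hands into a rank alphabet, then one native lexicographic comparison
--     a = first_set.translate(_TO_STRENGTH)
--     b = second_set[:len(first_set)].translate(_TO_STRENGTH)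
--     return None if a == b else a > b
-- ===== Notes on version B (the rewrite author's own statement) =====
-- stated objective: simpler
-- what changed: B replaces A's per-position loop of CARD_DISTINCT_2.index comparisons with no loop at all: both hands are mapped through an order-preserving str.translate table into a rank alphabet and the answer is a single native lexicographic string comparison (None on equality).
import Mathlib
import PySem

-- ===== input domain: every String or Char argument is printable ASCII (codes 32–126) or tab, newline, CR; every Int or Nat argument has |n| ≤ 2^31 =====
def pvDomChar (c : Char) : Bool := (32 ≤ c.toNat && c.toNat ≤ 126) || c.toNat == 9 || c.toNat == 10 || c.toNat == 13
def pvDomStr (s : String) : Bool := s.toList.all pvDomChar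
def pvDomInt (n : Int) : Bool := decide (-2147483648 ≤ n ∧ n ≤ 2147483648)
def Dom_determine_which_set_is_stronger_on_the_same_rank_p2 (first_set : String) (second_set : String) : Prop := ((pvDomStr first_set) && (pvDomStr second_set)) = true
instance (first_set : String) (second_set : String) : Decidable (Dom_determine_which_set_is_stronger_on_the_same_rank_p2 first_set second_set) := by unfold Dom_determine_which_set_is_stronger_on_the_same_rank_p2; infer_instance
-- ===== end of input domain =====

-- B translates both hands through an order-preserving card→rank-character table and decides by one
-- native lexicographic string comparison instead of A's per-position loop of list.index calls
-- (objective: simpler; return-value equivalence only, no mutation involved).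


-- ===== PORT A =====
def pvCards : List Char := ['A', 'K', 'Q', 'T', '9', '8', '7', '6', '5', '4', '3', '2', 'J']

-- the for-loop of A: walks first_set with the running index, indexing second_set by position
def pvLoopA : List Char → List Char → Nat → Option Bool
  | [], _, _ => none                                   -- loop finished: Python returns None
  | c :: rest, s, i =>
    match PySem.List.index? pvCards c with
    | none => none                                     -- ValueError (outside Pre_)
    | some a =>
      match PySem.List.pyGet? s (i : Int) with
      | none => none                                   -- IndexError (outside Pre_)
      | some c2 =>
        match PySem.List.index? pvCards c2 with
        | none => none                                 -- ValueError (outside Pre_)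
        | some b =>
          if a < b then some false
          else if a = b then pvLoopA rest s (i + 1)
          else some true

def determine_which_set_is_stronger_on_the_same_rank_p2 (first_set : String) (second_set : String) : Option Bool :=
  pvLoopA first_set.toList second_set.toList 0

-- ===== PORT B =====
-- _TO_STRENGTH = str.maketrans({c: chr(14 + i) for i, c in enumerate(CARD_DISTINCT_2)})
def pvToStrength : PySem.Dict Char Char :=
  (PySem.List.enumerate pvCards 0).foldl (fun d p => d.insert p.2 (Char.ofNat (14 + p.1.toNat))) PySem.Dict.empty

-- str.translate: each char mapped through the table, chars absent from the table kept unchanged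
def pvTranslate (l : List Char) : List Char := l.map (fun c => pvToStrength.getD c c)

-- Python's lexicographic '>' on strings (by code point; a proper prefix is smaller)
def pyStrGt : List Char → List Char → Bool
  | [], _ => false
  | _ :: _, [] => true
  | x :: xs, y :: ys => if x = y then pyStrGt xs ys else decide (y < x)

def determine_which_set_is_stronger_on_the_same_rank_p2_alt (first_set : String) (second_set : String) : Option Bool :=
  let a := pvTranslate first_set.toList
  let b := pvTranslate (PySem.List.slice second_set.toList none (some (first_set.toList.length : Int)))
  if a = b then none else some (pyStrGt a b)

-- ===== PRECONDITION & SPEC =====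
-- Pre_ holds exactly when Python A returns normally: every position j of first_set that the
-- loop reaches (all earlier positions are in-range ties) must carry a valid card in first_set
-- and an in-range valid card in second_set.
def Pre_determine_which_set_is_stronger_on_the_same_rank_p2 (first_set : String) (second_set : String) : Prop :=
  ∀ j, j < first_set.toList.length →
    (∀ i', i' < j → (i' < second_set.toList.length ∧
        first_set.toList.getD i' ' ' = second_set.toList.getD i' ' ')) →
    (first_set.toList.getD j ' ' ∈ pvCards ∧ j < second_set.toList.length ∧
        second_set.toList.getD j ' ' ∈ pvCards)
instance (first_set : String) (second_set : String) : Decidable (Pre_determine_which_set_is_stronger_on_the_same_rank_p2 first_set second_set) := by unfold Pre_determine_which_set_is_stronger_on_the_same_rank_p2; infer_instance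

def pvWitness_determine_which_set_is_stronger_on_the_same_rank_p2 : String × String := ("AK", "AQ")

def Spec_determine_which_set_is_stronger_on_the_same_rank_p2 (first_set : String) (second_set : String) (out : Option Bool) : Prop := out = determine_which_set_is_stronger_on_the_same_rank_p2_alt first_set second_set
instance (first_set : String) (second_set : String) (out : Option Bool) : Decidable (Spec_determine_which_set_is_stronger_on_the_same_rank_p2 first_set second_set out) := by unfold Spec_determine_which_set_is_stronger_on_the_same_rank_p2; infer_instance

-- ===== CLAIM (what is proved, stated in full; the proofs are below) =====
def Claim_equal_determine_which_set_is_stronger_on_the_same_rank_p2 : Prop := ∀ (first_set : String) (second_set : String), Dom_determine_which_set_is_stronger_on_the_same_rank_p2 first_set second_set → Pre_determine_which_set_is_stronger_on_the_same_rank_p2 first_set second_set → Spec_determine_which_set_is_stronger_on_the_same_rank_p2 first_set second_set (determine_which_set_is_stronger_on_the_same_rank_p2 first_set second_set)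


-- ===== LEMMAS AND PROOFS =====

-- the loop body of A, rephrased on the untraversed suffix of second_set
def pvLoop2 : List Char → List Char → Option Bool
  | [], _ => none
  | _ :: _, [] => none
  | c :: rest, c2 :: t =>
    match PySem.List.index? pvCards c with
    | none => none
    | some a =>
      match PySem.List.index? pvCards c2 with
      | none => none
      | some b =>
        if a < b then some false
        else if a = b then pvLoop2 rest t
        else some true

lemma pv_loopA_eq_loop2 (s : List Char) : ∀ (l : List Char) (i : Nat),
    pvLoopA l s i = pvLoop2 l (s.drop i) := by
  intro l
  induction l with
  | nil => intro i; simp [pvLoopA, pvLoop2]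
  | cons c rest ih =>
    intro i
    have hget : PySem.List.pyGet? s (i : Int) = s[i]? := PySem.List.pyGet?_natCast s i
    by_cases his : i < s.length
    · obtain ⟨c2, hc2⟩ : ∃ c2, s[i]? = some c2 := ⟨s[i], List.getElem?_eq_getElem his⟩
      have hdrop : s.drop i = c2 :: s.drop (i + 1) := by
        have hv : s[i] = c2 := by simpa [List.getElem?_eq_getElem his] using hc2
        rw [List.drop_eq_getElem_cons his, hv]
      rw [hdrop]
      simp only [pvLoopA, pvLoop2, hget, hc2]
      cases PySem.List.index? pvCards c with
      | none => rfl
      | some a =>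
        cases PySem.List.index? pvCards c2 with
        | none => rfl
        | some b =>
          by_cases h1 : a < b <;> by_cases h2 : a = b <;> simp [h1, h2, ih]
    · have : s[i]? = none := List.getElem?_eq_none (by omega)
      have hdrop : s.drop i = [] := List.drop_eq_nil_of_le (by omega)
      rw [hdrop]
      simp only [pvLoopA, pvLoop2, hget, this]
      cases PySem.List.index? pvCards c <;> rfl

lemma pv_index_inj {c c2 : Char} {a : Nat}
    (ha : PySem.List.index? pvCards c = some a)
    (hb : PySem.List.index? pvCards c2 = some a) : c = c2 := by
  obtain ⟨hk, hv, -⟩ := PySem.List.getElem_of_index?_eq_some ha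
  obtain ⟨hk2, hv2, -⟩ := PySem.List.getElem_of_index?_eq_some hb
  rw [← hv, ← hv2]

lemma pv_trans_card {c : Char} {a : Nat} (h : c ∈ pvCards)
    (ha : PySem.List.index? pvCards c = some a) :
    pvToStrength.getD c c = Char.ofNat (14 + a) := by
  simp only [pvCards, List.mem_cons, List.not_mem_nil, or_false] at h
  rcases h with rfl | rfl | rfl | rfl | rfl | rfl | rfl | rfl | rfl | rfl | rfl | rfl | rfl <;>
    (rw [show a = (PySem.List.index? pvCards _).getD 0 by rw [ha]; rfl]; decide)

lemma pv_char_cmp {a b : Nat} (ha : a < 13) (hb : b < 13) :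
    (Char.ofNat (14 + a) = Char.ofNat (14 + b) ↔ a = b) ∧
    (decide (Char.ofNat (14 + b) < Char.ofNat (14 + a)) = decide (b < a)) := by
  interval_cases a <;> interval_cases b <;> decide

-- the tie-prefix precondition, on the raw lists
def pvPre2 (l t : List Char) : Prop :=
  ∀ j, j < l.length →
    (∀ i', i' < j → (i' < t.length ∧ l.getD i' ' ' = t.getD i' ' ')) →
    (l.getD j ' ' ∈ pvCards ∧ j < t.length ∧ t.getD j ' ' ∈ pvCards)

lemma pv_main2 : ∀ (l t : List Char), pvPre2 l t →
    pvLoop2 l t =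
      (if pvTranslate l = pvTranslate (t.take l.length) then none
       else some (pyStrGt (pvTranslate l) (pvTranslate (t.take l.length)))) := by
  intro l
  induction l with
  | nil => intro t _; simp [pvLoop2, pvTranslate]
  | cons c rest ih =>
    intro t hpre
    obtain ⟨hc, hlen, hc2⟩ := hpre 0 (by simp) (by omega)
    cases t with
    | nil => simp at hlen
    | cons c2 t' =>
      simp only [List.getD_cons_zero] at hc hc2
      obtain ⟨a, ha⟩ := Option.isSome_iff_exists.mp
        ((PySem.List.index?_isSome_iff pvCards c).mpr hc)
      obtain ⟨b, hb⟩ := Option.isSome_iff_exists.mp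
        ((PySem.List.index?_isSome_iff pvCards c2).mpr hc2)
      have ha13 : a < 13 := by
        obtain ⟨hk, -, -⟩ := PySem.List.getElem_of_index?_eq_some ha
        simpa [pvCards] using hk
      have hb13 : b < 13 := by
        obtain ⟨hk, -, -⟩ := PySem.List.getElem_of_index?_eq_some hb
        simpa [pvCards] using hk
      have htake : (c2 :: t').take (c :: rest).length = c2 :: t'.take rest.length := by simp
      have htr : pvTranslate (c :: rest) = pvToStrength.getD c c :: pvTranslate rest := by
        simp [pvTranslate]
      have htr2 : pvTranslate (c2 :: t'.take rest.length)
          = pvToStrength.getD c2 c2 :: pvTranslate (t'.take rest.length) := by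
        simp [pvTranslate]
      rw [htake, htr, htr2, pv_trans_card hc ha, pv_trans_card hc2 hb]
      obtain ⟨heqiff, hltiff⟩ := pv_char_cmp ha13 hb13
      simp only [pvLoop2, ha, hb]
      by_cases hab : a = b
      · subst hab
        have hcc : c = c2 := pv_index_inj ha hb
        subst hcc
        have hrec := ih t' (fun j hj ant => by
          have := hpre (j + 1) (by simpa using Nat.succ_lt_succ hj)
            (fun i' hi' => by
              cases i' with
              | zero => exact ⟨by simp, by simp⟩
              | succ k =>
                have := ant k (by omega)
                simpa using this)
          simpa using this)
        rw [if_neg (lt_irrefl a), if_pos rfl, hrec]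
        by_cases he : pvTranslate rest = pvTranslate (t'.take rest.length)
        · simp [he]
        · simp [he, pyStrGt]
      · have hne : Char.ofNat (14 + a) ≠ Char.ofNat (14 + b) := fun h => hab (heqiff.mp h)
        have hlist : (Char.ofNat (14 + a) :: pvTranslate rest)
            ≠ (Char.ofNat (14 + b) :: pvTranslate (t'.take rest.length)) := by
          simp [hne]
        rw [if_neg hlist]
        by_cases hlt : a < b
        · have : ¬ (b < a) := by omega
          simp [hlt, pyStrGt, hne, hltiff, this]
        · have hgt : b < a := by omega
          simp [hlt, hab, pyStrGt, hne, hltiff, hgt]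

-- ===== VERDICT (by name: the statement is the Claim_ definition above) =====
theorem determine_which_set_is_stronger_on_the_same_rank_p2_spec : Claim_equal_determine_which_set_is_stronger_on_the_same_rank_p2 := by
  intro f s _ hpre
  unfold Spec_determine_which_set_is_stronger_on_the_same_rank_p2
  unfold determine_which_set_is_stronger_on_the_same_rank_p2
  unfold determine_which_set_is_stronger_on_the_same_rank_p2_alt
  rw [pv_loopA_eq_loop2, List.drop_zero,
      PySem.List.slice_to_natCast, pv_main2 f.toList s.toList hpre]
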